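-- pv_equiv track=rewrite | github.com/jebreimo/Argen | Argen2/parser_tools.py | find_last_not_of
-- ===== SOURCE A (Python) =====
-- def find_last_not_of(text, char):
--     if not text:
--         return -1
--     for i in range(len(text) - 1, -1, -1):
--         if text[i] != char:
--             break
--     else:
--         i = -1
--     return i
-- ===== SOURCE B (Python) =====
-- def find_last_not_of(text, char):
--     last = -1
--     for i, c in enumerate(text):
--         if c != char:
--             last = i
--     return last
-- ===== Notes on version B (the rewrite author's own statement) =====
-- stated objective: simpler
-- what changed: B scans the string front-to-back keeping an accumulator of the last differing index, instead of A's back-to-front scan with break and a for-else fallback; the empty/all-equal cases fall out of the initial -1 with no special casing.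
import Mathlib
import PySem

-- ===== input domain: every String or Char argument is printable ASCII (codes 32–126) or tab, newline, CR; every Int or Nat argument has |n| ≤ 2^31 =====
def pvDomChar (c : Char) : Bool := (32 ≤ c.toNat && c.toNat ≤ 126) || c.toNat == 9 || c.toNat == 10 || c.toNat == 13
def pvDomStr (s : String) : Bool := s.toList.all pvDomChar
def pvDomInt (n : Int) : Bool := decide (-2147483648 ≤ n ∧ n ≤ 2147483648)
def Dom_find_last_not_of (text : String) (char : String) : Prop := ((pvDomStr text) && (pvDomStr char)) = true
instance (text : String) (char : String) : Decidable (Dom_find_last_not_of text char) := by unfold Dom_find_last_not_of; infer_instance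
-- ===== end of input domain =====

-- B replaces A's back-to-front scan with break / for-else by a single front-to-back
-- fold keeping the last differing index in an accumulator (objective: simpler).


-- ===== PORT A =====
-- Back-to-front loop with break: index i from len-1 down to 0, return the first i
-- whose one-char string text[i] differs from char; the for-else sets i = -1.
def pvALoop (cs : List Char) (charL : List Char) : Nat → Int
  | 0 => if [cs.getD 0 ' '] ≠ charL then 0 else -1
  | i+1 => if [cs.getD (i+1) ' '] ≠ charL then ((i : Int) + 1) else pvALoop cs charL i

def find_last_not_of (text : String) (char : String) : Int :=
  if text.toList = [] then -1
  else pvALoop text.toList char.toList (text.toList.length - 1)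

-- ===== PORT B =====
-- Front-to-back fold: accumulator starts at -1, set to i on every differing char.
def find_last_not_of_alt (text : String) (char : String) : Int :=
  (PySem.List.enumerate text.toList 0).foldl
    (fun acc p => if [p.2] ≠ char.toList then p.1 else acc) (-1)

-- ===== PRECONDITION & SPEC =====
def Spec_find_last_not_of (text : String) (char : String) (out : Int) : Prop := out = find_last_not_of_alt text char
instance (text : String) (char : String) (out : Int) : Decidable (Spec_find_last_not_of text char out) := by unfold Spec_find_last_not_of; infer_instance

-- ===== CLAIM (what is proved, stated in full; the proofs are below) =====
def Claim_equal_find_last_not_of : Prop := ∀ (text : String) (char : String), Dom_find_last_not_of text char → Spec_find_last_not_of text char (find_last_not_of text char)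

-- ===== LEMMAS AND PROOFS =====

lemma pv_enumerate_append_singleton (xs : List Char) (y : Char) (s : Int) :
    PySem.List.enumerate (xs ++ [y]) s
      = PySem.List.enumerate xs s ++ [(s + xs.length, y)] := by
  induction xs generalizing s with
  | nil => simp [PySem.List.enumerate_nil, PySem.List.enumerate_cons]
  | cons x xs ih =>
      simp [PySem.List.enumerate_cons, ih]
      ring_nf

-- B's fold on xs ++ [y]
lemma pv_B_append (xs : List Char) (y : Char) (charL : List Char) :
    (PySem.List.enumerate (xs ++ [y]) 0).foldl
        (fun acc p => if [p.2] ≠ charL then p.1 else acc) (-1)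
      = if [y] ≠ charL then (xs.length : Int)
        else (PySem.List.enumerate xs 0).foldl
              (fun acc p => if [p.2] ≠ charL then p.1 else acc) (-1) := by
  rw [pv_enumerate_append_singleton]
  simp [List.foldl_append]

lemma pv_getD_app_left (xs : List Char) (y : Char) {i : Nat} (h : i < xs.length) :
    (xs ++ [y]).getD i ' ' = xs.getD i ' ' := by
  simp [List.getD, List.getElem?_append_left h]

lemma pv_getD_app_last (xs : List Char) (y : Char) :
    (xs ++ [y]).getD xs.length ' ' = y := by
  simp [List.getD]

-- A's loop ignores characters beyond the indices it visits
lemma pv_ALoop_append (xs : List Char) (y : Char) (charL : List Char) (i : Nat)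
    (h : i < xs.length) :
    pvALoop (xs ++ [y]) charL i = pvALoop xs charL i := by
  induction i with
  | zero => simp only [pvALoop, pv_getD_app_left xs y h]
  | succ i ih =>
      simp only [pvALoop, pv_getD_app_left xs y h]
      rw [ih (by omega)]

lemma pv_ALoop_last (xs : List Char) (y : Char) (charL : List Char) :
    pvALoop (xs ++ [y]) charL xs.length
      = if [y] ≠ charL then (xs.length : Int)
        else if xs = [] then -1 else pvALoop xs charL (xs.length - 1) := by
  cases hxs : xs with
  | nil => simp [pvALoop]
  | cons a as =>
      have hlen : xs.length = as.length + 1 := by rw [hxs]; simp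
      rw [← hxs]
      rw [hlen]
      simp only [pvALoop]
      have hg : (xs ++ [y]).getD (as.length + 1) ' ' = y := by
        rw [← hlen]; exact pv_getD_app_last xs y
      rw [hg, pv_ALoop_append xs y charL as.length (by omega)]
      simp [hxs]

-- list-level equivalence
lemma pv_main (cs charL : List Char) :
    (if cs = [] then -1 else pvALoop cs charL (cs.length - 1))
      = (PySem.List.enumerate cs 0).foldl
          (fun acc p => if [p.2] ≠ charL then p.1 else acc) (-1) := by
  induction cs using List.reverseRecOn with
  | nil => simp [PySem.List.enumerate_nil]
  | append_singleton xs y ih =>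
      rw [pv_B_append]
      simp only [if_neg (by simp : ¬ xs ++ [y] = [])]
      have hlen : (xs ++ [y]).length - 1 = xs.length := by simp
      rw [hlen, pv_ALoop_last]
      by_cases hy : [y] = charL
      · simp only [hy, ne_eq, not_true_eq_false, if_false, ite_not]
        simp only [ne_eq, ite_not] at ih
        exact ih
      · simp [hy]

-- ===== VERDICT (by name: the statement is the Claim_ definition above) =====
theorem find_last_not_of_spec : Claim_equal_find_last_not_of := by
  intro text char _
  unfold Spec_find_last_not_of find_last_not_of find_last_not_of_alt
  exact pv_main text.toList char.toList
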